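-- pv_equiv track=rewrite | github.com/Bytestorm5/Buckshot-Roulette-Python | stat_engine.py | possible_actions
-- ===== SOURCE A (Python) =====
-- import itertools
--
-- def possible_actions(action_pool: list):
--     actions = set()
--     actions.add(())
--     for i in range(1, len(action_pool)+1):
--         combs = list(itertools.combinations(action_pool, i))
--         for c in combs:
--             valid = True
--             mg = False
--             for item in c:
--                 if item == 'magnifying_glass':
--                     mg = True
--                 if item == 'beer'and mg:
--                     valid = False
--                     break
--             if valid:
--                 lc = list(c)
--                 actions.add(tuple(c))
--     return actions
-- ===== SOURCE B (Python) =====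
-- def possible_actions(action_pool: list):
--     # backtracking generator: builds only valid length-k combinations, pruning
--     # any branch that would place a 'beer' after a seen 'magnifying_glass'
--     def gen(k, items, mg):
--         if k == 0:
--             return [()]
--         if not items:
--             return []
--         x, rest = items[0], items[1:]
--         out = []
--         if not (x == 'beer' and mg):
--             out = [(x,) + t for t in gen(k - 1, rest, mg or x == 'magnifying_glass')]
--         return out + gen(k, rest, mg)
--
--     result = {()}
--     for k in range(1, len(action_pool) + 1):
--         for t in gen(k, action_pool, False):
--             result.add(t)
--     return result
-- ===== Notes on version B (the rewrite author's own statement) =====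
-- stated objective: alternative
-- what changed: A materializes every k-combination with itertools and then scans each tuple with a flag loop to reject beer-after-magnifying-glass; B replaces that by a recursive backtracking generator that prunes invalid branches while building, never producing a rejected tuple.
import Mathlib
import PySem

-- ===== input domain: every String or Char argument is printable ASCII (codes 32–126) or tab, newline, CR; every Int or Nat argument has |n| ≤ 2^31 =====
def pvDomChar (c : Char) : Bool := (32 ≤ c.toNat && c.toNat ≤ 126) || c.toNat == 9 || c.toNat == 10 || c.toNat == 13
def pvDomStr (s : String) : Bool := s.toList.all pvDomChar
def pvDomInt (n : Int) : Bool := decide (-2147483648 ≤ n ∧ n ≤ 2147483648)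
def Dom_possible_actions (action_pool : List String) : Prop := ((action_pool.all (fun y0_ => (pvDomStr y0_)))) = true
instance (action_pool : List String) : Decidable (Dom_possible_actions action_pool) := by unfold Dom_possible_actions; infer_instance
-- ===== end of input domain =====

-- B replaces A's generate-all-combinations-then-check loop by a backtracking generator
-- that prunes invalid branches (a 'beer' after a seen 'magnifying_glass') while building;
-- objective: alternative decomposition.  Both Pythons return a set; equality here is on
-- PySem.Set insertion order, which the two produce identically.

-- ===== PORT A =====
-- itertools.combinations(pool, k), tuples in itertools' lexicographic index order
def combosA : Nat → List String → List (List String)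
  | 0, _ => [[]]
  | _ + 1, [] => []
  | k + 1, x :: xs => (combosA k xs).map (fun c => x :: c) ++ combosA (k + 1) xs

-- A's inner 'for item in c' validity loop with its break
def aLoop : Bool → List String → Bool
  | _, [] => true
  | mg, item :: rest =>
    let mg := if item == "magnifying_glass" then true else mg
    if item == "beer" && mg then false else aLoop mg rest

def possible_actions (action_pool : List String) : List (List String) :=
  let actions : PySem.Set (List String) := PySem.Set.add PySem.Set.empty []
  (PySem.List.pyRange 1 (action_pool.length + 1) 1).foldl (fun actions i =>
    let combs := combosA i.toNat action_pool
    combs.foldl (fun actions c =>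
      if aLoop false c then PySem.Set.add actions c else actions) actions) actions

-- ===== PORT B =====
-- gen k items mg: valid length-k combinations of items, pruning beer-after-magnifying-glass
def genB : Nat → List String → Bool → List (List String)
  | 0, _, _ => [[]]
  | _ + 1, [], _ => []
  | k + 1, x :: xs, mg =>
    (if x == "beer" && mg then []
     else (genB k xs (mg || x == "magnifying_glass")).map (fun t => x :: t))
    ++ genB (k + 1) xs mg

def possible_actions_alt (action_pool : List String) : List (List String) :=
  let result : PySem.Set (List String) := PySem.Set.add PySem.Set.empty []
  (PySem.List.pyRange 1 (action_pool.length + 1) 1).foldl (fun result k =>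
    (genB k.toNat action_pool false).foldl (fun result t => PySem.Set.add result t) result) result

-- ===== PRECONDITION & SPEC =====
def Spec_possible_actions (action_pool : List String) (out : List (List String)) : Prop := out = possible_actions_alt action_pool
instance (action_pool : List String) (out : List (List String)) : Decidable (Spec_possible_actions action_pool out) := by unfold Spec_possible_actions; infer_instance

-- ===== CLAIM (what is proved, stated in full; the proofs are below) =====
def Claim_equal_possible_actions : Prop := ∀ (action_pool : List String), Dom_possible_actions action_pool → Spec_possible_actions action_pool (possible_actions action_pool)

-- ===== LEMMAS AND PROOFS =====

-- B's pruned generator = A's generator followed by A's validity filter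
theorem genB_eq_filter (xs : List String) :
    ∀ (k : Nat) (mg : Bool), genB k xs mg = (combosA k xs).filter (fun c => aLoop mg c) := by
  induction xs with
  | nil =>
    intro k mg
    cases k <;> simp [genB, combosA, aLoop]
  | cons x xs ih =>
    intro k mg
    cases k with
    | zero => simp [genB, combosA, aLoop]
    | succ k =>
      have hmap : ((combosA k xs).map (fun c => x :: c)).filter (fun c => aLoop mg c)
          = ((combosA k xs).filter (fun c => aLoop mg (x :: c))).map (fun c => x :: c) := by
        rw [List.filter_map]; rfl
      show (if x == "beer" && mg then []
            else (genB k xs (mg || x == "magnifying_glass")).map (fun t => x :: t))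
            ++ genB (k + 1) xs mg
          = ((combosA k xs).map (fun c => x :: c) ++ combosA (k + 1) xs).filter
              (fun c => aLoop mg c)
      rw [List.filter_append, hmap, ih (k + 1) mg]
      by_cases hb : x = "beer"
      · subst hb
        by_cases hm : mg
        · subst hm
          simp [aLoop]
        · simp at hm; subst hm
          simp [aLoop, ih k]
      · have hbe : (x == "beer") = false := by simp [hb]
        by_cases hg : x = "magnifying_glass"
        · subst hg
          simp [aLoop, ih k]
        · have hge : (x == "magnifying_glass") = false := by simp [hg]
          simp [aLoop, hbe, hge, ih k]

-- folding with a guarded add = folding add over the filtered list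
theorem foldl_if_filter {α β : Type} (p : α → Bool) (f : β → α → β) :
    ∀ (l : List α) (s : β),
      l.foldl (fun s c => if p c then f s c else s) s = (l.filter p).foldl f s := by
  intro l
  induction l with
  | nil => intro s; rfl
  | cons x xs ih =>
    intro s
    by_cases h : p x <;> simp [h, ih]

-- ===== VERDICT (by name: the statement is the Claim_ definition above) =====
theorem possible_actions_spec : Claim_equal_possible_actions := by
  intro action_pool _
  show possible_actions action_pool = possible_actions_alt action_pool
  unfold possible_actions possible_actions_alt
  have hf : (fun (actions : PySem.Set (List String)) (i : Int) =>
        (combosA i.toNat action_pool).foldl (fun actions c =>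
          if aLoop false c then PySem.Set.add actions c else actions) actions)
      = (fun (result : PySem.Set (List String)) (k : Int) =>
        (genB k.toNat action_pool false).foldl (fun result t => PySem.Set.add result t) result) := by
    funext s i
    rw [foldl_if_filter, genB_eq_filter]
  rw [hf]
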